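-- pv_equiv track=rewrite | github.com/chickitza/midiTex | MidiReader.py | fit_in_range
-- ===== SOURCE A (Python) =====
-- def fit_in_range(num, left, right):
--     count = 0
--     if num < left or num > right:
--         while num < left or num > right:
--             if num < left:
--                 num += 12
--                 count -= 1
--             elif num > right:
--                 num -= 12
--                 count += 1
--     return count
-- ===== SOURCE B (Python) =====
-- def fit_in_range(num, left, right):
--     # Closed form: ceil-divide the distance to the range by 12.
--     if left <= num <= right:
--         return 0
--     if num < left:
--         return -((left - num + 11) // 12)
--     return (num - right + 11) // 12
-- ===== Notes on version B (the rewrite author's own statement) =====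
-- stated objective: alternative
-- what changed: A's step-by-12 while loop is replaced by a closed-form ceiling division of the distance to the range boundary; it trades the loop for O(1) arithmetic, though a timing run could not measure a ratio (A diverges on most large random inputs).
import Mathlib
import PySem

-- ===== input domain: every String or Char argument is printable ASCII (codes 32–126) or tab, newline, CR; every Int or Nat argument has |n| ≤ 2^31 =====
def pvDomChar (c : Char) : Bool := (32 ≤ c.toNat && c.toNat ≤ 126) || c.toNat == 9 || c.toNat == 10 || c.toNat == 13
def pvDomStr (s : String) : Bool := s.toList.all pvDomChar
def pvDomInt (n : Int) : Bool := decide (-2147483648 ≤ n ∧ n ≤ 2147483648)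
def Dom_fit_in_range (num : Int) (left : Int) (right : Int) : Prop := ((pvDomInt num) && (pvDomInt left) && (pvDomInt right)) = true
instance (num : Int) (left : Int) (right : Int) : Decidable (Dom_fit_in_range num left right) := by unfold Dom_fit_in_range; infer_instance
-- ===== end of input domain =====

-- B replaces A's step-by-12 while loop with a closed-form ceiling division (alternative arithmetic formulation).
-- Pre_ excludes exactly the inputs on which A's loop never terminates (Python A diverges there).


-- ===== PORT A =====
-- A's while loop, made total with a fuel parameter; the fuel chosen in fit_in_range
-- is large enough whenever the Python loop terminates (guaranteed by Pre_), so it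
-- never changes the computed value on admitted inputs.
def fitLoop (left right : Int) : Nat → Int → Int → Int
  | 0, _, count => count
  | fuel + 1, num, count =>
    if num < left ∨ num > right then
      if num < left then fitLoop left right fuel (num + 12) (count - 1)
      else fitLoop left right fuel (num - 12) (count + 1)
    else count

def fit_in_range (num : Int) (left : Int) (right : Int) : Int :=
  -- count = 0; if num < left or num > right: while …
  if num < left ∨ num > right then
    fitLoop left right ((left - num).natAbs + (num - right).natAbs + 1) num 0
  else 0

-- ===== PORT B =====
def fit_in_range_alt (num : Int) (left : Int) (right : Int) : Int :=
  if left ≤ num ∧ num ≤ right then 0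
  else if num < left then -(PySem.Int.floordiv (left - num + 11) 12)
  else PySem.Int.floordiv (num - right + 11) 12

-- ===== PRECONDITION & SPEC =====
-- Pre_ excludes exactly the inputs on which Python A loops forever (the 12-shift
-- overshoots the range from both sides); A returns no value there.
def Pre_fit_in_range (num : Int) (left : Int) (right : Int) : Prop :=
  (left ≤ num ∧ num ≤ right)
  ∨ (num < left ∧ num + 12 * ((left - num + 11) / 12) ≤ right)
  ∨ (right < num ∧ left ≤ num - 12 * ((num - right + 11) / 12))
instance (num : Int) (left : Int) (right : Int) : Decidable (Pre_fit_in_range num left right) := by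
  unfold Pre_fit_in_range; infer_instance

def pvWitness_fit_in_range : Int × Int × Int := (100, 0, 20)

def Spec_fit_in_range (num : Int) (left : Int) (right : Int) (out : Int) : Prop := out = fit_in_range_alt num left right
instance (num : Int) (left : Int) (right : Int) (out : Int) : Decidable (Spec_fit_in_range num left right out) := by unfold Spec_fit_in_range; infer_instance

-- ===== CLAIM (what is proved, stated in full; the proofs are below) =====
def Claim_equal_fit_in_range : Prop := ∀ (num : Int) (left : Int) (right : Int), Dom_fit_in_range num left right → Pre_fit_in_range num left right → Spec_fit_in_range num left right (fit_in_range num left right)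

-- ===== LEMMAS AND PROOFS =====

-- Loop invariant, low side: after k more +12 steps the value lands in the range.
theorem fitLoop_low (left right : Int) (k : Nat) :
    ∀ (fuel : Nat) (num count : Int), k ≤ fuel →
    left ≤ num + 12 * k → num + 12 * k ≤ right →
    (k = 0 ∨ num + 12 * k - 12 < left) →
    fitLoop left right fuel num count = count - k := by
  induction k with
  | zero =>
    intro fuel num count _ h1 h2 _
    simp at h1 h2
    cases fuel with
    | zero => simp [fitLoop]
    | succ f => simp [fitLoop]; omega
  | succ k ih =>
    intro fuel num count hf h1 h2 h3
    have hnum : num < left := by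
      rcases h3 with h | h
      · omega
      · push_cast at h ⊢; omega
    cases fuel with
    | zero => omega
    | succ f =>
      have hcond : num < left ∨ num > right := Or.inl hnum
      simp only [fitLoop, if_pos hcond, if_pos hnum]
      have := ih f (num + 12) (count - 1) (by omega)
        (by push_cast at h1 ⊢; omega) (by push_cast at h2 ⊢; omega)
        (by push_cast at h1 ⊢; omega)
      rw [this]; push_cast; ring

-- Loop invariant, high side.
theorem fitLoop_high (left right : Int) (k : Nat) :
    ∀ (fuel : Nat) (num count : Int), k ≤ fuel →
    left ≤ num - 12 * k → num - 12 * k ≤ right →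
    (k = 0 ∨ num - 12 * k + 12 > right) →
    fitLoop left right fuel num count = count + k := by
  induction k with
  | zero =>
    intro fuel num count _ h1 h2 _
    simp at h1 h2
    cases fuel with
    | zero => simp [fitLoop]
    | succ f => simp [fitLoop]; omega
  | succ k ih =>
    intro fuel num count hf h1 h2 h3
    have hnum : num > right := by
      rcases h3 with h | h
      · omega
      · push_cast at h ⊢; omega
    have hnl : ¬ num < left := by push_cast at h1; omega
    cases fuel with
    | zero => omega
    | succ f =>
      have hcond : num < left ∨ num > right := Or.inr hnum
      simp only [fitLoop, if_pos hcond, if_neg hnl]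
      have := ih f (num - 12) (count + 1) (by omega)
        (by push_cast at h1 ⊢; omega) (by push_cast at h2 ⊢; omega)
        (by push_cast at h2 ⊢; omega)
      rw [this]; push_cast; ring

-- ===== VERDICT (by name: the statement is the Claim_ definition above) =====
theorem fit_in_range_spec : Claim_equal_fit_in_range := by
  intro num left right _ hpre
  unfold Spec_fit_in_range fit_in_range fit_in_range_alt
  rw [PySem.Int.floordiv_eq_ediv_of_pos (by omega), PySem.Int.floordiv_eq_ediv_of_pos (by omega)]
  by_cases hin : left ≤ num ∧ num ≤ right
  · rw [if_neg (by omega), if_pos hin]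
  · rw [if_pos (by omega), if_neg hin]
    rcases hpre with h | h | h
    · omega
    · -- low side: k = ceil((left-num)/12) = (left-num+11)/12 steps of +12
      obtain ⟨hlt, hle⟩ := h
      set q : Int := (left - num + 11) / 12 with hq
      have hq0 : 0 ≤ q := by omega
      have hceil : left ≤ num + 12 * q ∧ num + 12 * q - 12 < left := by
        constructor <;> omega
      have hk : ((q.toNat : Int)) = q := Int.toNat_of_nonneg hq0
      have hql : q ≤ left - num := by omega
      have hfuel : q.toNat ≤ (left - num).natAbs + (num - right).natAbs + 1 := by omega
      rw [fitLoop_low left right q.toNat _ num 0 hfuel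
        (by rw [hk]; exact hceil.1) (by rw [hk]; omega) (by rw [hk]; omega)]
      rw [if_pos hlt]
      omega
    · -- high side
      obtain ⟨hgt, hle⟩ := h
      set q : Int := (num - right + 11) / 12 with hq
      have hq0 : 0 ≤ q := by omega
      have hk : ((q.toNat : Int)) = q := Int.toNat_of_nonneg hq0
      have hql : q ≤ num - right := by omega
      have hfuel : q.toNat ≤ (left - num).natAbs + (num - right).natAbs + 1 := by omega
      rw [fitLoop_high left right q.toNat _ num 0 hfuel
        (by rw [hk]; omega) (by rw [hk]; omega) (by rw [hk]; omega)]
      rw [if_neg (show ¬ num < left by omega)]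
      omega
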